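-- pv_equiv track=rewrite | github.com/fcesargm/desafiosDojoPuzzle | buracoNasLetras/buracoNasLetras.py | contandoosburacos
-- ===== SOURCE A (Python) =====
-- def contandoosburacos(texto):
--     soma = 0
--     for i in range(len(texto)):
--         letra = texto[i]
--         if letra == 'a' or letra == 'b' or letra == 'd' or letra == 'e' or letra == 'g' or letra == 'o' or letra == 'p' or letra == 'q' or letra == 'R' or letra == 'Q' or letra == 'O' or letra == 'A' or letra == 'D':
--             buracos = 1
--         elif letra == 'B':
--             buracos = 2
--         else:
--             buracos = 0
--         soma = buracos + soma
--     return soma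
-- ===== SOURCE B (Python) =====
-- HOLES = {'a': 1, 'b': 1, 'd': 1, 'e': 1, 'g': 1, 'o': 1, 'p': 1, 'q': 1,
--          'R': 1, 'Q': 1, 'O': 1, 'A': 1, 'D': 1, 'B': 2}
--
--
-- def contandoosburacos(texto):
--     # one frequency-counting pass, then a weighted sum over the 14 hole-bearing letters
--     freq = {}
--     for ch in texto:
--         freq[ch] = freq.get(ch, 0) + 1
--     return sum(freq.get(letra, 0) * buracos for letra, buracos in HOLES.items())
-- ===== Notes on version B (the rewrite author's own statement) =====
-- stated objective: alternative
-- what changed: Replaces the per-character 14-way branch accumulation with a single frequency-counting pass into a dict followed by a weighted sum over the fixed hole-count table (count-then-weigh decomposition).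
import Mathlib
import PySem

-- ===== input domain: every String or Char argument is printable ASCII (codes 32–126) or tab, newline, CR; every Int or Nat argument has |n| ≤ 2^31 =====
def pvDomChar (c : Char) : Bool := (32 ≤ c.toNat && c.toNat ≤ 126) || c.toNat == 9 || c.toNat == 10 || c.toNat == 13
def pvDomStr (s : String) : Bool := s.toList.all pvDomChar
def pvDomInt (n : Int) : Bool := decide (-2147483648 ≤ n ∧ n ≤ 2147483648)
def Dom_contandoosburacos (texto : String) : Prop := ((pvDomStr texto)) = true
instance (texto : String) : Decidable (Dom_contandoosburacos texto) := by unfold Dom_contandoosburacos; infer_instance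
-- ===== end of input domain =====

-- B replaces A's per-character branch accumulation by a frequency-count pass plus a weighted sum
-- over the fixed hole table (alternative decomposition, same O(n) cost).

-- ===== PORT A =====
-- A's 'for i in range(len(texto)): letra = texto[i]' visits exactly the characters of texto in
-- order, so it is ported as a fold over texto.toList with the same branch and the same 'buracos + soma' update.
def contandoosburacos (texto : String) : Int :=
  texto.toList.foldl (fun soma letra =>
    (if letra = 'a' ∨ letra = 'b' ∨ letra = 'd' ∨ letra = 'e' ∨ letra = 'g' ∨ letra = 'o' ∨
        letra = 'p' ∨ letra = 'q' ∨ letra = 'R' ∨ letra = 'Q' ∨ letra = 'O' ∨ letra = 'A' ∨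
        letra = 'D' then (1 : Int)
     else if letra = 'B' then 2 else 0) + soma) 0

-- ===== PORT B =====
-- the HOLES table of Source B (a dict with distinct literal keys, iterated in insertion order)
def pvHoles : List (Char × Int) :=
  [('a', 1), ('b', 1), ('d', 1), ('e', 1), ('g', 1), ('o', 1), ('p', 1), ('q', 1),
   ('R', 1), ('Q', 1), ('O', 1), ('A', 1), ('D', 1), ('B', 2)]

def contandoosburacos_alt (texto : String) : Int :=
  let freq : PySem.Dict Char Int :=
    texto.toList.foldl (fun d ch => d.insert ch (d.getD ch 0 + 1)) PySem.Dict.empty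
  pvHoles.foldl (fun acc p => acc + freq.getD p.1 0 * p.2) 0

-- ===== PRECONDITION & SPEC =====
def Spec_contandoosburacos (texto : String) (out : Int) : Prop := out = contandoosburacos_alt texto
instance (texto : String) (out : Int) : Decidable (Spec_contandoosburacos texto out) := by unfold Spec_contandoosburacos; infer_instance

-- ===== CLAIM (what is proved, stated in full; the proofs are below) =====
def Claim_equal_contandoosburacos : Prop := ∀ (texto : String), Dom_contandoosburacos texto → Spec_contandoosburacos texto (contandoosburacos texto)

-- ===== LEMMAS AND PROOFS =====

-- total hole weight of a character list, expressed through per-letter counts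
def pvW (l : List Char) : Int :=
  (l.count 'a' : Int) + l.count 'b' + l.count 'd' + l.count 'e' + l.count 'g' + l.count 'o' +
  l.count 'p' + l.count 'q' + l.count 'R' + l.count 'Q' + l.count 'O' + l.count 'A' +
  l.count 'D' + 2 * l.count 'B'

lemma pvW_cons (c : Char) (l : List Char) :
    pvW (c :: l) = pvW l +
      (if c = 'a' ∨ c = 'b' ∨ c = 'd' ∨ c = 'e' ∨ c = 'g' ∨ c = 'o' ∨ c = 'p' ∨ c = 'q' ∨
          c = 'R' ∨ c = 'Q' ∨ c = 'O' ∨ c = 'A' ∨ c = 'D' then (1 : Int)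
       else if c = 'B' then 2 else 0) := by
  by_cases h1 : c = 'a'
  · subst h1; simp [pvW]; ring
  by_cases h2 : c = 'b'
  · subst h2; simp [pvW]; ring
  by_cases h3 : c = 'd'
  · subst h3; simp [pvW]; ring
  by_cases h4 : c = 'e'
  · subst h4; simp [pvW]; ring
  by_cases h5 : c = 'g'
  · subst h5; simp [pvW]; ring
  by_cases h6 : c = 'o'
  · subst h6; simp [pvW]; ring
  by_cases h7 : c = 'p'
  · subst h7; simp [pvW]; ring
  by_cases h8 : c = 'q'
  · subst h8; simp [pvW]; ring
  by_cases h9 : c = 'R'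
  · subst h9; simp [pvW]; ring
  by_cases h10 : c = 'Q'
  · subst h10; simp [pvW]; ring
  by_cases h11 : c = 'O'
  · subst h11; simp [pvW]; ring
  by_cases h12 : c = 'A'
  · subst h12; simp [pvW]; ring
  by_cases h13 : c = 'D'
  · subst h13; simp [pvW]; ring
  by_cases h14 : c = 'B'
  · subst h14; simp [pvW]; ring
  · simp [pvW, h1, h2, h3, h4, h5, h6, h7, h8, h9, h10, h11, h12, h13, h14]

lemma pvA_foldl (l : List Char) (s : Int) :
    l.foldl (fun soma letra =>
      (if letra = 'a' ∨ letra = 'b' ∨ letra = 'd' ∨ letra = 'e' ∨ letra = 'g' ∨ letra = 'o' ∨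
          letra = 'p' ∨ letra = 'q' ∨ letra = 'R' ∨ letra = 'Q' ∨ letra = 'O' ∨ letra = 'A' ∨
          letra = 'D' then (1 : Int)
       else if letra = 'B' then 2 else 0) + soma) s = s + pvW l := by
  induction l generalizing s with
  | nil => simp [pvW]
  | cons c l ih =>
    rw [List.foldl_cons, ih, pvW_cons]
    ring

lemma pvAlt_eval (texto : String) : contandoosburacos_alt texto = pvW texto.toList := by
  simp only [contandoosburacos_alt, pvHoles, List.foldl,
    PySem.Dict.getD_foldl_insert_add_one, PySem.Dict.getD_empty, pvW]
  ring

-- ===== VERDICT (by name: the statement is the Claim_ definition above) =====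
theorem contandoosburacos_spec : Claim_equal_contandoosburacos := by
  intro texto _
  unfold Spec_contandoosburacos
  rw [pvAlt_eval, contandoosburacos, pvA_foldl]
  ring
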